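-- pv_equiv track=rewrite | github.com/algo-cancer/DETOPT | src/detopt_util.py | vec_to_anc_matrix
-- ===== SOURCE A (Python) =====
-- def vec_to_anc_matrix(vec):
-- 	A = {}
-- 	root_id = 'ROOT'
-- 	for node_i in vec.keys():
-- 		A[node_i] = {}
-- 		for node_j in vec.keys():
-- 			A[node_i][node_j] = 0
-- 	for node_j in vec.keys():
-- 		node_i = node_j
-- 		while node_i != root_id:
-- 			A[node_i][node_j] = 1
-- 			node_i = vec[node_i]
-- 	for node in vec.keys():
-- 		A[node][node] = 0 # a node is NOT an ancestor of itself for our purposes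
-- 	# result: if A[i][j] = 1, node i is ancestor of node j
-- 	return A
-- ===== SOURCE B (Python) =====
-- def vec_to_anc_matrix(vec):
-- 	# Compute each node's set of strict ancestors by recursion on the parent
-- 	# pointer, then build the matrix as a pure nested comprehension.
-- 	def anc(node):
-- 		if node == 'ROOT':
-- 			return set()
-- 		p = vec[node]
-- 		return set() if p == 'ROOT' else {p} | anc(p)
-- 	ancs = {j: anc(j) for j in vec}
-- 	return {i: {j: int(i in ancs[j]) for j in vec} for i in vec}
-- ===== Notes on version B (the rewrite author's own statement) =====
-- stated objective: simpler
-- what changed: Replaces the zero-initialised matrix mutated column-by-column with a diagonal reset by a recursive strict-ancestor-set computation per node plus a pure nested comprehension that writes each cell once.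
import Mathlib
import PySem

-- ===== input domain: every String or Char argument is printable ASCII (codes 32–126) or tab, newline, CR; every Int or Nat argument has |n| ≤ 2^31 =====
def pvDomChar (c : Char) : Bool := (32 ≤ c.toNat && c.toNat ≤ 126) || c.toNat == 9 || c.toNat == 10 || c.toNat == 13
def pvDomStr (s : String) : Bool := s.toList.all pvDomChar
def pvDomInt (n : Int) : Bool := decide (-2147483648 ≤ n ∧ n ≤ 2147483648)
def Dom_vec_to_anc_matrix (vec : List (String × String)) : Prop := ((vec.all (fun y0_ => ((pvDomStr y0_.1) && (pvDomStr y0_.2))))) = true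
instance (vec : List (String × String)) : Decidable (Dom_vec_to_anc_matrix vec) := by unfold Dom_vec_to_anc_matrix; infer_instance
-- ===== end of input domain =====

-- B replaces A's zero-initialised matrix, mutated column-by-column and diagonal-reset, by a recursive
-- strict-ancestor-set computation per node plus a pure nested comprehension (simpler; return value only).

-- ===== PORT A =====
-- the while loop 'while node_i != root_id: A[node_i][node_j] = 1; node_i = vec[node_i]' as fuel
-- recursion (fuel = number of keys + 1 suffices on Pre_, where the chain is duplicate-free)
def pvWalkA (d : PySem.Dict String String) (j : String) :
    Nat → String → PySem.Dict String (PySem.Dict String Int) → PySem.Dict String (PySem.Dict String Int)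
  | 0, _, A => A
  | f + 1, i, A =>
    if i = "ROOT" then A
    else pvWalkA d j f (d.getD i "ROOT") (A.modify i PySem.Dict.empty (fun row => row.insert j 1))

def vec_to_anc_matrix (vec : List (String × String)) : List (String × List (String × Int)) :=
  let d := PySem.Dict.ofList vec
  let ks := d.keys
  -- A[node_i] = {}; for node_j …: A[node_i][node_j] = 0   (row built, then stored)
  let A0 : PySem.Dict String (PySem.Dict String Int) :=
    ks.foldl (fun A i => A.insert i (ks.foldl (fun row j => row.insert j (0 : Int)) PySem.Dict.empty))
      PySem.Dict.empty
  let A1 := ks.foldl (fun A j => pvWalkA d j (ks.length + 1) j A) A0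
  let A2 := ks.foldl (fun A k => A.modify k PySem.Dict.empty (fun row => row.insert k (0 : Int))) A1
  A2.items.map (fun p => (p.1, p.2.items))

-- ===== PORT B =====
-- def anc(node): if node == 'ROOT': return set(); p = vec[node]; return set() if p == 'ROOT' else {p} | anc(p)
def pvAncB (d : PySem.Dict String String) : Nat → String → List String
  | 0, _ => []
  | f + 1, node =>
    if node = "ROOT" then []
    else
      let p := d.getD node "ROOT"
      if p = "ROOT" then [] else PySem.Set.add (pvAncB d f p) p

def vec_to_anc_matrix_alt (vec : List (String × String)) : List (String × List (String × Int)) :=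
  let d := PySem.Dict.ofList vec
  let ks := d.keys
  -- ancs = {j: anc(j) for j in vec}  (keys of a dict are distinct, so the comprehension is a map)
  let ancs : PySem.Dict String (List String) :=
    ks.foldl (fun m j => m.insert j (pvAncB d (ks.length + 1) j)) PySem.Dict.empty
  -- {i: {j: int(i in ancs[j]) for j in vec} for i in vec}
  ks.map (fun i => (i, ks.map (fun j => (j, if i ∈ ancs.getD j [] then (1 : Int) else 0))))

-- ===== PRECONDITION & SPEC =====
-- one parent-pointer step: ROOT is absorbing, otherwise follow vec (missing parents fall to ROOT;
-- the first conjunct of Pre_ rules that case out on every reachable node)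
def pvStep (d : PySem.Dict String String) (s : String) : String :=
  if s = "ROOT" then s else d.getD s "ROOT"

-- Pre_ is exactly A's returning domain: every key other than 'ROOT' (whose walk stops at once) has a parent
-- that is again a key or 'ROOT' (else vec[node_i] raises KeyError), and the |keys|-fold parent map sends every
-- such key to 'ROOT' (else the while loop cycles forever).
def Pre_vec_to_anc_matrix (vec : List (String × String)) : Prop :=
  (∀ k ∈ (PySem.Dict.ofList vec).keys, k ≠ "ROOT" →
      (PySem.Dict.ofList vec).getD k "ROOT" = "ROOT" ∨
        (PySem.Dict.ofList vec).getD k "ROOT" ∈ (PySem.Dict.ofList vec).keys) ∧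
  (∀ k ∈ (PySem.Dict.ofList vec).keys, k ≠ "ROOT" →
      (pvStep (PySem.Dict.ofList vec))^[(PySem.Dict.ofList vec).keys.length] k = "ROOT")

instance (vec : List (String × String)) : Decidable (Pre_vec_to_anc_matrix vec) := by
  unfold Pre_vec_to_anc_matrix; infer_instance

def pvWitness_vec_to_anc_matrix : (List (String × String)) := [("a", "ROOT"), ("b", "a")]

def Spec_vec_to_anc_matrix (vec : List (String × String)) (out : List (String × List (String × Int))) : Prop := out = vec_to_anc_matrix_alt vec
instance (vec : List (String × String)) (out : List (String × List (String × Int))) : Decidable (Spec_vec_to_anc_matrix vec out) := by unfold Spec_vec_to_anc_matrix; infer_instance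

-- ===== CLAIM (what is proved, stated in full; the proofs are below) =====
def Claim_equal_vec_to_anc_matrix : Prop := ∀ (vec : List (String × String)), Dom_vec_to_anc_matrix vec → Pre_vec_to_anc_matrix vec → Spec_vec_to_anc_matrix vec (vec_to_anc_matrix vec)


-- ===== LEMMAS AND PROOFS =====

-- the node list A's while loop marks, walking up from i with the given fuel
def pvM (d : PySem.Dict String String) : Nat → String → List String
  | 0, _ => []
  | f + 1, i => if i = "ROOT" then [] else i :: pvM d f (d.getD i "ROOT")

-- one cell of the matrix under construction
def pvCell (A : PySem.Dict String (PySem.Dict String Int)) (i j : String) : Int :=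
  (A.getD i PySem.Dict.empty).getD j 0

theorem pvM_root (d : PySem.Dict String String) (f : Nat) : pvM d f "ROOT" = [] := by
  cases f <;> simp [pvM]

theorem pvWalkA_cell (d : PySem.Dict String String) (j : String) :
    ∀ (f : Nat) (i : String) (A : PySem.Dict String (PySem.Dict String Int)) (i' j' : String),
      pvCell (pvWalkA d j f i A) i' j' =
        if i' ∈ pvM d f i ∧ j' = j then 1 else pvCell A i' j' := by
  intro f
  induction f with
  | zero => intro i A i' j'; simp [pvWalkA, pvM]
  | succ f ih =>
    intro i A i' j'
    by_cases hroot : i = "ROOT"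
    · simp [pvWalkA, pvM, hroot]
    · rw [show pvWalkA d j (f+1) i A =
          pvWalkA d j f (d.getD i "ROOT") (A.modify i PySem.Dict.empty (fun row => row.insert j 1))
          from by simp [pvWalkA, hroot]]
      rw [ih]
      have hstep : pvCell (A.modify i PySem.Dict.empty (fun row => row.insert j 1)) i' j' =
          if i' = i ∧ j' = j then 1 else pvCell A i' j' := by
        unfold pvCell
        rw [PySem.Dict.getD_modify]
        by_cases hi : i' = i
        · rw [if_pos hi, PySem.Dict.getD_insert]
          by_cases hj : j' = j
          · rw [if_pos hj, if_pos ⟨hi, hj⟩]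
          · rw [if_neg hj, if_neg (by tauto), hi]
        · rw [if_neg hi, if_neg (by tauto)]
      rw [hstep]
      simp only [pvM, if_neg hroot, List.mem_cons]
      by_cases hj : j' = j
      · by_cases hi : i' = i
        · simp [hi, hj]
        · by_cases hm : i' ∈ pvM d f (d.getD i "ROOT") <;> simp [hi, hj, hm]
      · simp [hj]

theorem pvWalkA_keys (d : PySem.Dict String String) (j : String) :
    ∀ (f : Nat) (i : String) (A : PySem.Dict String (PySem.Dict String Int)),
      (∀ x ∈ pvM d f i, x ∈ A.keys) → (pvWalkA d j f i A).keys = A.keys := by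
  intro f
  induction f with
  | zero => intro i A _; simp [pvWalkA]
  | succ f ih =>
    intro i A h
    by_cases hroot : i = "ROOT"
    · simp [pvWalkA, hroot]
    · rw [show pvWalkA d j (f+1) i A =
          pvWalkA d j f (d.getD i "ROOT") (A.modify i PySem.Dict.empty (fun row => row.insert j 1))
          from by simp [pvWalkA, hroot]]
      have hik : i ∈ A.keys := h i (by simp [pvM, hroot])
      have hkeys : (A.modify i PySem.Dict.empty (fun row => row.insert j 1)).keys = A.keys := by
        rw [PySem.Dict.keys_modify, PySem.Dict.keys_insert_of_contains]
        rw [PySem.Dict.contains_eq_decide_mem_keys]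
        simp [hik]
      rw [ih _ _ (by rw [hkeys]; intro x hx; exact h x (by simp [pvM, hroot, hx])), hkeys]

theorem pvWalkA_row_keys (d : PySem.Dict String String) (j : String) :
    ∀ (f : Nat) (i : String) (A : PySem.Dict String (PySem.Dict String Int)),
      (∀ x ∈ pvM d f i, j ∈ (A.getD x PySem.Dict.empty).keys) →
      ∀ i', ((pvWalkA d j f i A).getD i' PySem.Dict.empty).keys = (A.getD i' PySem.Dict.empty).keys := by
  intro f
  induction f with
  | zero => intro i A _ i'; simp [pvWalkA]
  | succ f ih =>
    intro i A h i'
    by_cases hroot : i = "ROOT"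
    · simp [pvWalkA, hroot]
    · rw [show pvWalkA d j (f+1) i A =
          pvWalkA d j f (d.getD i "ROOT") (A.modify i PySem.Dict.empty (fun row => row.insert j 1))
          from by simp [pvWalkA, hroot]]
      have hrowi : j ∈ (A.getD i PySem.Dict.empty).keys := h i (by simp [pvM, hroot])
      have hstep : ∀ x, ((A.modify i PySem.Dict.empty (fun row => row.insert j 1)).getD x PySem.Dict.empty).keys
          = (A.getD x PySem.Dict.empty).keys := by
        intro x
        rw [PySem.Dict.getD_modify]
        by_cases hx : x = i
        · rw [if_pos hx, hx, PySem.Dict.keys_insert_of_contains]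
          rw [PySem.Dict.contains_eq_decide_mem_keys]
          simp [hrowi]
        · rw [if_neg hx]
      rw [ih _ _ (by intro x hx; rw [hstep]; exact h x (by simp [pvM, hroot, hx])), hstep]

theorem pvM_subset (d : PySem.Dict String String)
    (hP1 : ∀ k ∈ d.keys, k ≠ "ROOT" → d.getD k "ROOT" = "ROOT" ∨ d.getD k "ROOT" ∈ d.keys) :
    ∀ (f : Nat) (i : String), i ∈ d.keys → ∀ x ∈ pvM d f i, x ∈ d.keys := by
  intro f
  induction f with
  | zero => intro i _ x hx; simp [pvM] at hx
  | succ f ih =>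
    intro i hi x hx
    by_cases hroot : i = "ROOT"
    · simp [pvM, hroot] at hx
    · simp only [pvM, if_neg hroot, List.mem_cons] at hx
      rcases hx with rfl | hx
      · exact hi
      · rcases hP1 i hi hroot with hR | hk
        · rw [hR, pvM_root] at hx; simp at hx
        · exact ih _ hk x hx

theorem pvM_stable (d : PySem.Dict String String) :
    ∀ (m : Nat) (x : String), (pvStep d)^[m] x = "ROOT" →
      ∀ f, m ≤ f → pvM d f x = pvM d m x := by
  intro m
  induction m with
  | zero =>
    intro x hx f _
    simp only [Function.iterate_zero, id] at hx
    subst hx; rw [pvM_root]; rfl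
  | succ m ih =>
    intro x hx f hf
    by_cases hroot : x = "ROOT"
    · subst hroot; rw [pvM_root, pvM_root]
    · have hx' : (pvStep d)^[m] (d.getD x "ROOT") = "ROOT" := by
        have := Function.iterate_succ_apply (pvStep d) m x
        rw [this] at hx
        rwa [show pvStep d x = d.getD x "ROOT" from by simp [pvStep, hroot]] at hx
      obtain ⟨f', rfl⟩ : ∃ f', f = f' + 1 := ⟨f - 1, by omega⟩
      have hf' : m ≤ f' := by omega
      simp only [pvM, if_neg hroot]
      rw [ih _ hx' f' hf']

theorem pvM_mem_iter (d : PySem.Dict String String) :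
    ∀ (f : Nat) (i x : String), x ∈ pvM d f i →
      ∃ t, t < f ∧ (pvStep d)^[t] i = x ∧ ∀ s ≤ t, (pvStep d)^[s] i ≠ "ROOT" := by
  intro f
  induction f with
  | zero => intro i x hx; simp [pvM] at hx
  | succ f ih =>
    intro i x hx
    by_cases hroot : i = "ROOT"
    · simp [pvM, hroot] at hx
    · simp only [pvM, if_neg hroot, List.mem_cons] at hx
      rcases hx with rfl | hx
      · exact ⟨0, by omega, rfl, by intro s hs; interval_cases s; simpa using hroot⟩
      · obtain ⟨t, ht, hit, hne⟩ := ih _ x hx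
        refine ⟨t + 1, by omega, ?_, ?_⟩
        · rw [Function.iterate_succ_apply,
            show pvStep d i = d.getD i "ROOT" from by simp [pvStep, hroot]]
          exact hit
        · intro s hs
          cases s with
          | zero => simpa using hroot
          | succ s =>
            rw [Function.iterate_succ_apply,
              show pvStep d i = d.getD i "ROOT" from by simp [pvStep, hroot]]
            exact hne s (by omega)

theorem pv_iter_mul (d : PySem.Dict String String) (T : Nat) (j : String)
    (hT : (pvStep d)^[T] j = j) : ∀ q, (pvStep d)^[q * T] j = j := by
  intro q
  induction q with
  | zero => simp
  | succ q ih =>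
    have : (q + 1) * T = T + q * T := by ring
    rw [this, Function.iterate_add_apply, ih, hT]

theorem pv_no_self (d : PySem.Dict String String) (n : Nat) (j : String)
    (hterm : (pvStep d)^[n] j = "ROOT") (hroot : j ≠ "ROOT") :
    ∀ f, j ∉ pvM d f (d.getD j "ROOT") := by
  intro f hmem
  obtain ⟨t, _, hit, hne⟩ := pvM_mem_iter d f _ j hmem
  have hstep : pvStep d j = d.getD j "ROOT" := by simp [pvStep, hroot]
  have hT : (pvStep d)^[t + 1] j = j := by
    rw [Function.iterate_succ_apply, hstep]; exact hit
  have hne' : ∀ s ≤ t + 1, (pvStep d)^[s] j ≠ "ROOT" := by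
    intro s hs
    cases s with
    | zero => simpa using hroot
    | succ s => rw [Function.iterate_succ_apply, hstep]; exact hne s (by omega)
  have hmul := pv_iter_mul d (t + 1) j hT (n / (t + 1))
  have hsplit : n % (t + 1) + n / (t + 1) * (t + 1) = n := by
    rw [Nat.mul_comm]; exact Nat.mod_add_div n (t + 1)
  have hfin : (pvStep d)^[n] j = (pvStep d)^[n % (t + 1)] j := by
    conv_lhs => rw [← hsplit]
    rw [Function.iterate_add_apply, hmul]
  rw [hterm] at hfin
  have hlt : n % (t + 1) < t + 1 := Nat.mod_lt n (by omega)
  exact hne' (n % (t + 1)) (by omega) hfin.symm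

theorem pvAncB_eq_M (d : PySem.Dict String String) :
    ∀ (f : Nat) (j : String), j ≠ "ROOT" →
      ∀ x, x ∈ pvAncB d (f + 1) j ↔ x ∈ pvM d (f + 1) (d.getD j "ROOT") := by
  intro f
  induction f with
  | zero =>
    intro j hroot x
    by_cases hp : d.getD j "ROOT" = "ROOT"
    · simp [pvAncB, pvM, hroot, hp]
    · simp [pvAncB, pvM, hroot, hp, or_comm]
  | succ f ih =>
    intro j hroot x
    by_cases hp : d.getD j "ROOT" = "ROOT"
    · simp [pvAncB, pvM, hroot, hp]
    · rw [show pvAncB d (f + 1 + 1) j = PySem.Set.add (pvAncB d (f + 1) (d.getD j "ROOT")) (d.getD j "ROOT")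
          from by simp [pvAncB, hroot, hp]]
      rw [PySem.Set.mem_add]
      rw [show pvM d (f + 1 + 1) (d.getD j "ROOT") =
          (d.getD j "ROOT") :: pvM d (f + 1) (d.getD (d.getD j "ROOT") "ROOT")
          from by simp [pvM, hp]]
      rw [List.mem_cons, ih _ hp x]
      tauto
  
theorem pvFold1_cell (d : PySem.Dict String String) (F : Nat) :
    ∀ (js : List String) (A : PySem.Dict String (PySem.Dict String Int)) (i j : String),
      pvCell (js.foldl (fun A j => pvWalkA d j F j A) A) i j =
        if j ∈ js ∧ i ∈ pvM d F j then 1 else pvCell A i j := by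
  intro js
  induction js with
  | nil => intro A i j; simp
  | cons j0 js ih =>
    intro A i j
    rw [List.foldl_cons, ih]
    rw [pvWalkA_cell]
    by_cases hj : j = j0
    · subst hj
      by_cases hm : i ∈ pvM d F j
      · by_cases hjs : j ∈ js <;> simp [hm, hjs]
      · simp [hm]
    · simp only [List.mem_cons]
      by_cases hjs : j ∈ js
      · simp [hjs, hj]
      · simp [hjs, hj]

theorem pvFold2_cell :
    ∀ (js : List String) (A : PySem.Dict String (PySem.Dict String Int)) (i j : String),
      pvCell (js.foldl (fun A k => A.modify k PySem.Dict.empty (fun row => row.insert k (0 : Int))) A) i j =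
        if i = j ∧ i ∈ js then 0 else pvCell A i j := by
  intro js
  induction js with
  | nil => intro A i j; simp
  | cons k js ih =>
    intro A i j
    rw [List.foldl_cons, ih]
    have hstep : pvCell (A.modify k PySem.Dict.empty (fun row => row.insert k (0 : Int))) i j =
        if i = k ∧ j = k then 0 else pvCell A i j := by
      unfold pvCell
      rw [PySem.Dict.getD_modify]
      by_cases hi : i = k
      · rw [if_pos hi, PySem.Dict.getD_insert]
        by_cases hj : j = k <;> simp [hi, hj]
      · simp [hi]
    rw [hstep]
    simp only [List.mem_cons]
    by_cases hij : i = j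
    · subst hij
      by_cases hk : i = k
      · subst hk; simp
      · simp [hk]
    · simp only [if_neg (by tauto : ¬(i = j ∧ (i = k ∨ i ∈ js))), if_neg (by tauto : ¬(i = j ∧ i ∈ js))]
      by_cases hk : i = k ∧ j = k
      · exact absurd (hk.1.trans hk.2.symm) hij
      · rw [if_neg hk]


theorem pvFold1_inv (d : PySem.Dict String String) (F : Nat)
    (hP1 : ∀ k ∈ d.keys, k ≠ "ROOT" → d.getD k "ROOT" = "ROOT" ∨ d.getD k "ROOT" ∈ d.keys) :
    ∀ (js : List String) (A : PySem.Dict String (PySem.Dict String Int)),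
      (∀ j ∈ js, j ∈ d.keys) → A.keys = d.keys →
      (∀ x ∈ d.keys, (A.getD x PySem.Dict.empty).keys = d.keys) →
      (js.foldl (fun A j => pvWalkA d j F j A) A).keys = d.keys ∧
        (∀ x ∈ d.keys, ((js.foldl (fun A j => pvWalkA d j F j A) A).getD x PySem.Dict.empty).keys = d.keys) := by
  intro js
  induction js with
  | nil => intro A _ hk hr; exact ⟨hk, hr⟩
  | cons j0 js ih =>
    intro A hjs hk hr
    have hj0 : j0 ∈ d.keys := hjs j0 (by simp)
    have hsub : ∀ x ∈ pvM d F j0, x ∈ d.keys := pvM_subset d hP1 F j0 hj0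
    have hkeys : (pvWalkA d j0 F j0 A).keys = A.keys :=
      pvWalkA_keys d j0 F j0 A (by intro x hx; rw [hk]; exact hsub x hx)
    have hrows : ∀ i', ((pvWalkA d j0 F j0 A).getD i' PySem.Dict.empty).keys = (A.getD i' PySem.Dict.empty).keys :=
      pvWalkA_row_keys d j0 F j0 A (by intro x hx; rw [hr x (hsub x hx)]; exact hj0)
    rw [List.foldl_cons]
    exact ih _ (by intro j hj; exact hjs j (by simp [hj])) (by rw [hkeys, hk])
      (by intro x hx; rw [hrows, hr x hx])

theorem pvFold2_inv (d : PySem.Dict String String) :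
    ∀ (js : List String) (A : PySem.Dict String (PySem.Dict String Int)),
      (∀ k ∈ js, k ∈ d.keys) → A.keys = d.keys →
      (∀ x ∈ d.keys, (A.getD x PySem.Dict.empty).keys = d.keys) →
      (js.foldl (fun A k => A.modify k PySem.Dict.empty (fun row => row.insert k (0 : Int))) A).keys = d.keys ∧
        (∀ x ∈ d.keys, ((js.foldl (fun A k => A.modify k PySem.Dict.empty (fun row => row.insert k (0 : Int))) A).getD x PySem.Dict.empty).keys = d.keys) := by
  intro js
  induction js with
  | nil => intro A _ hk hr; exact ⟨hk, hr⟩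
  | cons k0 js ih =>
    intro A hjs hk hr
    have hk0 : k0 ∈ d.keys := hjs k0 (by simp)
    have hkeys : (A.modify k0 PySem.Dict.empty (fun row => row.insert k0 (0 : Int))).keys = A.keys := by
      rw [PySem.Dict.keys_modify, PySem.Dict.keys_insert_of_contains]
      rw [PySem.Dict.contains_eq_decide_mem_keys]
      simp [hk ▸ hk0]
    have hrows : ∀ i', ((A.modify k0 PySem.Dict.empty (fun row => row.insert k0 (0 : Int))).getD i' PySem.Dict.empty).keys
        = (A.getD i' PySem.Dict.empty).keys := by
      intro i'
      rw [PySem.Dict.getD_modify]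
      by_cases hx : i' = k0
      · rw [if_pos hx, hx, PySem.Dict.keys_insert_of_contains]
        rw [PySem.Dict.contains_eq_decide_mem_keys]
        simp [hr k0 hk0, hk0]
      · rw [if_neg hx]
    rw [List.foldl_cons]
    exact ih _ (by intro j hj; exact hjs j (by simp [hj])) (by rw [hkeys, hk])
      (by intro x hx; rw [hrows, hr x hx])

theorem pvCellValue (d : PySem.Dict String String)
    (hP2 : ∀ k ∈ d.keys, k ≠ "ROOT" → (pvStep d)^[d.keys.length] k = "ROOT")
    (i j : String) (hj : j ∈ d.keys) :
    (if i = j then (0 : Int) else if i ∈ pvM d (d.keys.length + 1) j then 1 else 0) =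
      (if i ∈ pvAncB d (d.keys.length + 1) j then 1 else 0) := by
  set n := d.keys.length with hn
  by_cases hjr : j = "ROOT"
  · subst hjr
    rw [pvM_root]
    rw [show pvAncB d (n + 1) "ROOT" = [] from by simp [pvAncB]]
    by_cases hi : i = "ROOT" <;> simp [hi]
  · have hterm : (pvStep d)^[n] j = "ROOT" := hP2 j hj hjr
    have hstepj : pvStep d j = d.getD j "ROOT" := by simp [pvStep, hjr]
    have hgd : (pvStep d)^[n] (d.getD j "ROOT") = "ROOT" := by
      rw [← hstepj, ← Function.iterate_succ_apply, Function.iterate_succ_apply', hterm]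
      simp [pvStep]
    have hstab : pvM d (n + 1) (d.getD j "ROOT") = pvM d n (d.getD j "ROOT") :=
      pvM_stable d n _ hgd (n + 1) (by omega)
    have hanc : ∀ x, x ∈ pvAncB d (n + 1) j ↔ x ∈ pvM d n (d.getD j "ROOT") := by
      intro x; rw [← hstab]; exact pvAncB_eq_M d n j hjr x
    have hMj : pvM d (n + 1) j = j :: pvM d n (d.getD j "ROOT") := by
      simp only [pvM, if_neg hjr]
    by_cases hij : i = j
    · rw [if_pos hij]
      have hnot : i ∉ pvAncB d (n + 1) j := by
        intro hmem
        exact pv_no_self d n j hterm hjr n (hij ▸ (hanc i).1 hmem)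
      rw [if_neg hnot]
    · rw [if_neg hij, hMj]
      by_cases hm : i ∈ pvM d n (d.getD j "ROOT")
      · rw [if_pos (by simp [hm]), if_pos ((hanc i).2 hm)]
      · rw [if_neg (by simp [hij, hm]), if_neg (by rw [hanc i]; exact hm)]

-- ===== VERDICT (the statement is the Claim_ definition above) =====
theorem vec_to_anc_matrix_spec : Claim_equal_vec_to_anc_matrix := by
  intro vec _ hpre
  obtain ⟨hP1, hP2⟩ := hpre
  show vec_to_anc_matrix vec = vec_to_anc_matrix_alt vec
  simp only [vec_to_anc_matrix, vec_to_anc_matrix_alt]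
  set d := PySem.Dict.ofList vec with hd
  set ks := d.keys with hks
  set F := ks.length + 1 with hF
  set row0 := ks.foldl (fun row j => row.insert j (0 : Int)) PySem.Dict.empty with hrow0
  set A0 := ks.foldl (fun A i => A.insert i row0) PySem.Dict.empty with hA0
  set A1 := ks.foldl (fun A j => pvWalkA d j F j A) A0 with hA1
  set A2 := ks.foldl (fun A k => A.modify k PySem.Dict.empty (fun row => row.insert k (0 : Int))) A1 with hA2
  set ancs := ks.foldl (fun m j => m.insert j (pvAncB d F j)) PySem.Dict.empty with hancs
  have hnd : ks.Nodup := PySem.Dict.nodup_keys_ofList vec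
  -- row0
  have hrow0_items : row0.items = ks.map (fun j => (j, (0 : Int))) := by
    rw [hrow0]
    have h := PySem.Dict.items_foldl_insert_fresh ks (fun a => a) (fun _ => (0 : Int))
      PySem.Dict.empty (by intro a _; simp [PySem.Dict.contains_empty]) (by simpa using hnd)
    simpa using h
  have hrow0_keys : row0.keys = ks := by
    show row0.items.map Prod.fst = ks
    rw [hrow0_items, List.map_map]
    rw [show (Prod.fst ∘ fun j : String => (j, (0 : Int))) = id from rfl, List.map_id]
  have hrow0_getD : ∀ j ∈ ks, row0.getD j 0 = 0 := by
    intro j hj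
    exact PySem.Dict.getD_of_mem_items row0 (by rw [hrow0_items]; exact List.mem_map_of_mem hj)
      (by rw [hrow0_keys]; exact hnd) 0
  -- A0
  have hA0_items : A0.items = ks.map (fun i => (i, row0)) := by
    rw [hA0]
    have h := PySem.Dict.items_foldl_insert_fresh ks (fun a => a) (fun _ => row0)
      PySem.Dict.empty (by intro a _; simp [PySem.Dict.contains_empty]) (by simpa using hnd)
    simpa using h
  have hA0_keys : A0.keys = ks := by
    show A0.items.map Prod.fst = ks
    rw [hA0_items, List.map_map]
    rw [show (Prod.fst ∘ fun i : String => (i, row0)) = id from rfl, List.map_id]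
  have hA0_getD : ∀ i ∈ ks, A0.getD i PySem.Dict.empty = row0 := by
    intro i hi
    exact PySem.Dict.getD_of_mem_items A0 (by rw [hA0_items]; exact List.mem_map_of_mem hi)
      (by rw [hA0_keys]; exact hnd) PySem.Dict.empty
  have hA0_cell : ∀ i ∈ ks, ∀ j ∈ ks, pvCell A0 i j = 0 := by
    intro i hi j hj
    unfold pvCell
    rw [hA0_getD i hi, hrow0_getD j hj]
  have hA0_rows : ∀ x ∈ ks, (A0.getD x PySem.Dict.empty).keys = ks := by
    intro x hx; rw [hA0_getD x hx]; exact hrow0_keys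
  -- invariants through the two mutation passes
  have inv1 := pvFold1_inv d F hP1 ks A0 (fun _ h => h) hA0_keys hA0_rows
  rw [← hA1] at inv1
  have inv2 := pvFold2_inv d ks A1 (fun _ h => h) inv1.1 inv1.2
  rw [← hA2] at inv2
  -- ancs
  have hancs_items : ancs.items = ks.map (fun j => (j, pvAncB d F j)) := by
    rw [hancs]
    have h := PySem.Dict.items_foldl_insert_fresh ks (fun a => a) (fun j => pvAncB d F j)
      PySem.Dict.empty (by intro a _; simp [PySem.Dict.contains_empty]) (by simpa using hnd)
    simpa using h
  have hancs_keys : ancs.keys = ks := by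
    show ancs.items.map Prod.fst = ks
    rw [hancs_items, List.map_map]
    rw [show (Prod.fst ∘ fun j : String => (j, pvAncB d F j)) = id from rfl, List.map_id]
  have hancs_getD : ∀ j ∈ ks, ancs.getD j [] = pvAncB d F j := by
    intro j hj
    exact PySem.Dict.getD_of_mem_items ancs (by rw [hancs_items]; exact List.mem_map_of_mem hj)
      (by rw [hancs_keys]; exact hnd) []
  -- assemble
  have hA2_items : A2.items = ks.map (fun k => (k, A2.getD k PySem.Dict.empty)) := by
    have h := PySem.Dict.items_eq_map_keys A2 (by rw [inv2.1]; exact hnd) PySem.Dict.empty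
    rw [inv2.1] at h
    exact h
  rw [hA2_items, List.map_map]
  apply List.map_congr_left
  intro i hi
  simp only [Function.comp]
  congr 1
  have hrow_items : (A2.getD i PySem.Dict.empty).items =
      ks.map (fun j => (j, (A2.getD i PySem.Dict.empty).getD j 0)) := by
    have h := PySem.Dict.items_eq_map_keys (A2.getD i PySem.Dict.empty)
      (by rw [inv2.2 i hi]; exact hnd) (0 : Int)
    rw [inv2.2 i hi] at h
    exact h
  rw [hrow_items]
  apply List.map_congr_left
  intro j hj
  congr 1
  have hcell : (A2.getD i PySem.Dict.empty).getD j 0 =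
      if i = j then 0 else if i ∈ pvM d F j then 1 else 0 := by
    show pvCell A2 i j = _
    rw [hA2, pvFold2_cell, hA1, pvFold1_cell, hA0_cell i hi j hj]
    simp [hi, hj]
  rw [hcell, hancs_getD j hj]
  exact pvCellValue d hP2 i j hj
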